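-- pv_equiv track=rewrite | github.com/evaristomat/lol | scripts/players.py | extract_player_patched
-- ===== SOURCE A (Python) =====
-- from typing import Dict, List, Optional, Tuple
--
-- def extract_player_patched(selection_name: str, candidates: List[str]) -> Optional[str]:
--     """Busca por nome do jogador no selection_name (robusto a formatos)."""
--     low = str(selection_name).lower()
--     # 1) word boundary
--     for c in sorted(candidates, key=len, reverse=True):
--         if f" {c.lower()} " in f" {low} ":
--             return c
--     # 2) substring
--     for c in sorted(candidates, key=len, reverse=True):
--         if c.lower() in low:
--             return c
--     return None
-- ===== SOURCE B (Python) =====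
-- def extract_player_patched(selection_name, candidates):
--     """Single pass over the longest-first ordering, deferring substring hits as a fallback."""
--     low = str(selection_name).lower()
--     fallback = None
--     for c in sorted(candidates, key=len, reverse=True):
--         if f" {c.lower()} " in f" {low} ":
--             return c
--         if fallback is None and c.lower() in low:
--             fallback = c
--     return fallback
-- ===== Notes on version B (the rewrite author's own statement) =====
-- stated objective: simpler
-- what changed: A's two separate scans over the sorted candidate list are fused into one pass that returns a word-boundary hit immediately and keeps the first substring hit in a fallback accumulator.
import Mathlib
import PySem

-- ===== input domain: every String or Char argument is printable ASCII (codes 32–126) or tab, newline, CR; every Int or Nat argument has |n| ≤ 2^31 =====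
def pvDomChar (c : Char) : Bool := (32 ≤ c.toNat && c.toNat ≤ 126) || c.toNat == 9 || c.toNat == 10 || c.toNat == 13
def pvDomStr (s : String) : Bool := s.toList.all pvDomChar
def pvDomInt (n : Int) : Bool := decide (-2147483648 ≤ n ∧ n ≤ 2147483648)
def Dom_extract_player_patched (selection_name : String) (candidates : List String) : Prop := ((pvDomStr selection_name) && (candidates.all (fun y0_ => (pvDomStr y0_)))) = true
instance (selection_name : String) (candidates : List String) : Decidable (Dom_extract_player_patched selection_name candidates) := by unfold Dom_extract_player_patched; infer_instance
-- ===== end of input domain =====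

-- B fuses A's two scans over the sorted list into one pass with a fallback accumulator (objective: simpler).

-- ===== PORT A =====
-- ' {c.lower()} ' in ' {low} '  (word-boundary test), on the char-list side
def epWordHit (low : List Char) (c : String) : Bool :=
  PySem.Chars.isIn (' ' :: PySem.Chars.lower c.toList ++ [' ']) (' ' :: low ++ [' '])

-- c.lower() in low  (substring test)
def epSubHit (low : List Char) (c : String) : Bool :=
  PySem.Chars.isIn (PySem.Chars.lower c.toList) low

def extract_player_patched (selection_name : String) (candidates : List String) : Option String :=
  let low := PySem.Chars.lower selection_name.toList
  match (PySem.List.sorted candidates (fun c => PySem.Str.len c) true).find? (epWordHit low) with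
  | some c => some c
  | none => (PySem.List.sorted candidates (fun c => PySem.Str.len c) true).find? (epSubHit low)

-- ===== PORT B =====
-- one pass: return a word-boundary hit at once, remember the first substring hit
def epGo (low : List Char) : List String → Option String → Option String
  | [], fb => fb
  | c :: rest, fb =>
    if epWordHit low c then some c
    else epGo low rest (if fb.isNone && epSubHit low c then some c else fb)

def extract_player_patched_alt (selection_name : String) (candidates : List String) : Option String :=
  epGo (PySem.Chars.lower selection_name.toList)
    (PySem.List.sorted candidates (fun c => PySem.Str.len c) true) none

-- ===== PRECONDITION & SPEC =====
def Spec_extract_player_patched (selection_name : String) (candidates : List String) (out : Option String) : Prop := out = extract_player_patched_alt selection_name candidates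
instance (selection_name : String) (candidates : List String) (out : Option String) : Decidable (Spec_extract_player_patched selection_name candidates out) := by unfold Spec_extract_player_patched; infer_instance

-- ===== CLAIM (what is proved, stated in full; the proofs are below) =====
def Claim_equal_extract_player_patched : Prop := ∀ (selection_name : String) (candidates : List String), Dom_extract_player_patched selection_name candidates → Spec_extract_player_patched selection_name candidates (extract_player_patched selection_name candidates)

-- ===== LEMMAS AND PROOFS =====
lemma epGo_spec (low : List Char) (l : List String) (fb : Option String) :
    epGo low l fb =
      match l.find? (epWordHit low) with
      | some c => some c
      | none => fb.or (l.find? (epSubHit low)) := by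
  induction l generalizing fb with
  | nil => cases fb <;> simp [epGo]
  | cons c rest ih =>
    by_cases h1 : epWordHit low c
    · simp [epGo, h1, List.find?]
    · by_cases h2 : epSubHit low c <;> cases fb <;>
        simp [epGo, h1, h2, ih, List.find?]

-- ===== VERDICT (by name: the statement is the Claim_ definition above) =====
theorem extract_player_patched_spec : Claim_equal_extract_player_patched := by
  intro sel cands _
  show _ = _
  rw [extract_player_patched_alt, epGo_spec, extract_player_patched]
  cases (PySem.List.sorted cands (fun c => PySem.Str.len c) true).find?
      (epWordHit (PySem.Chars.lower sel.toList)) <;> simp
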